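-- pv_equiv track=rewrite | github.com/brmson/synonyms-pccp | synonyms/scripts/filter_synonyms.py | cut
-- ===== SOURCE A (Python) =====
-- def cut(synonyms_map, cutoff):
--     synonyms_map_cutoff = {}
--     for target, synonyms in synonyms_map.items():
--         synonyms_cutoff = []
--         for synonym in synonyms:
--             if len(synonyms_cutoff) > cutoff:
--                 break
--             if synonym not in synonyms_cutoff and synonym != target:
--                 synonyms_cutoff.append(synonym)
--         if len(synonyms_cutoff) != 0:
--             synonyms_map_cutoff[target] = synonyms_cutoff
--     return synonyms_map_cutoff
-- ===== SOURCE B (Python) =====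
-- def cut(synonyms_map, cutoff):
--     bound = max(cutoff + 1, 0)
--     result = {}
--     for target, synonyms in synonyms_map.items():
--         distinct = set(synonyms)
--         distinct.discard(target)
--         ordered = sorted(distinct, key=synonyms.index)[:bound]
--         if ordered:
--             result[target] = ordered
--     return result
-- ===== Notes on version B (the rewrite author's own statement) =====
-- stated objective: alternative
-- what changed: A's single fused per-target scan (membership-tested append with an early break) is replaced by a set-then-sort algorithm: build set(synonyms), discard the target, sort the distinct elements by their first index in the original list, slice to max(cutoff+1,0), and keep non-empty results.
import Mathlib
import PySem

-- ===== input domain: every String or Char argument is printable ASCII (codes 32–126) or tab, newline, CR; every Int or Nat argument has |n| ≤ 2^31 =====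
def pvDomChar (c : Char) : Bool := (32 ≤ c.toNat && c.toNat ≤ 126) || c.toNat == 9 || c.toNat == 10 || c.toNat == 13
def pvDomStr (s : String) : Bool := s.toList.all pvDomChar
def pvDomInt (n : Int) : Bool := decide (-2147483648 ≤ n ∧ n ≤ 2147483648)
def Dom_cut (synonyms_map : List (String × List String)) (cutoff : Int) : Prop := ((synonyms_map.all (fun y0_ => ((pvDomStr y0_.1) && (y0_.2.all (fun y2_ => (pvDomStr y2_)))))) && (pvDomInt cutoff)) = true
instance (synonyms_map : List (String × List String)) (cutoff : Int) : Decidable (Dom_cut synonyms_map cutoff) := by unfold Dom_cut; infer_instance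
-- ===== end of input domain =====

-- B replaces A's fused scan (membership-tested append with early break) by a set-then-sort
-- algorithm: set(synonyms) minus the target, sorted by first index in the original list, then
-- sliced to max(cutoff+1, 0); same return value (objective: alternative).

-- ===== PORT A =====
-- inner 'for synonym in synonyms' loop of A, with its early break; acc = synonyms_cutoff
def cutInner (target : String) (cutoff : Int) (acc : List String) : List String → List String
  | [] => acc
  | s :: rest =>
    if (acc.length : Int) > cutoff then acc
    else if !acc.contains s && s != target then cutInner target cutoff (acc ++ [s]) rest
    else cutInner target cutoff acc rest

def cut (synonyms_map : List (String × List String)) (cutoff : Int) : List (String × List String) :=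
  (synonyms_map.foldl
    (fun d p =>
      let synonyms_cutoff := cutInner p.1 cutoff [] p.2
      if synonyms_cutoff.length ≠ 0 then d.insert p.1 synonyms_cutoff else d)
    PySem.Dict.empty).items

-- ===== PORT B =====
def cut_alt (synonyms_map : List (String × List String)) (cutoff : Int) : List (String × List String) :=
  let bound := (max (cutoff + 1) 0).toNat  -- bound = max(cutoff+1, 0) ≥ 0, so the slice [:bound] is List.take bound
  (synonyms_map.foldl
    (fun d p =>
      let distinct := PySem.Set.discard (PySem.Set.ofList p.2) p.1
      -- sorted(distinct, key=synonyms.index): the key is injective on the set and every element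
      -- occurs in p.2, so List.idxOf (first index) is exactly Python's list.index here
      let ordered := (PySem.List.sorted distinct (fun s => p.2.idxOf s) false).take bound
      if ordered ≠ [] then d.insert p.1 ordered else d)
    PySem.Dict.empty).items

-- ===== PRECONDITION & SPEC =====
def Spec_cut (synonyms_map : List (String × List String)) (cutoff : Int) (out : List (String × List String)) : Prop := out = cut_alt synonyms_map cutoff
instance (synonyms_map : List (String × List String)) (cutoff : Int) (out : List (String × List String)) : Decidable (Spec_cut synonyms_map cutoff out) := by unfold Spec_cut; infer_instance

-- ===== CLAIM (what is proved, stated in full; the proofs are below) =====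
def Claim_equal_cut : Prop := ∀ (synonyms_map : List (String × List String)) (cutoff : Int), Dom_cut synonyms_map cutoff → Spec_cut synonyms_map cutoff (cut synonyms_map cutoff)

-- ===== LEMMAS AND PROOFS =====

-- ofList commutes with filter (order-preserving dedup of a filtered list)
theorem ofList_filter {α : Type} [BEq α] [LawfulBEq α] (p : α → Bool) (xs : List α) :
    PySem.Set.ofList (xs.filter p) = (PySem.Set.ofList xs).filter p := by
  induction xs with
  | nil => rfl
  | cons x xs ih =>
    by_cases hp : p x
    · rw [List.filter_cons_of_pos hp, PySem.Set.ofList_cons, PySem.Set.ofList_cons,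
        List.filter_cons_of_pos hp]
      simp only [PySem.Set.discard, List.filter_filter, ih]
      congr 1
      apply List.filter_congr
      intro y _
      cases (y == x) <;> cases p y <;> rfl
    · rw [List.filter_cons_of_neg hp, PySem.Set.ofList_cons, List.filter_cons_of_neg hp,
        PySem.Set.discard, List.filter_filter, ih]
      apply List.filter_congr
      intro y _
      by_cases hyx : y = x
      · subst hyx
        simp only [Bool.not_eq_true] at hp
        simp [hp]
      · simp [hyx]

-- A's inner loop, generalized over the accumulator
theorem cutInner_eq (t : String) (c : Int) (l : List String) : ∀ (acc : List String),
    cutInner t c acc l =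
      acc ++ (PySem.Set.ofList (l.filter (fun s => !acc.contains s && s != t))).take
        (c + 1 - acc.length).toNat := by
  induction l with
  | nil => intro acc; simp [cutInner]
  | cons s rest ih =>
    intro acc
    by_cases hc : (acc.length : Int) > c
    · have h0 : (c + 1 - (acc.length : Int)).toNat = 0 := by omega
      simp [cutInner, hc, h0]
    · by_cases hs : (!acc.contains s && s != t) = true
      · have hkeep : cutInner t c acc (s :: rest) = cutInner t c (acc ++ [s]) rest := by
          simp only [cutInner]
          rw [if_neg hc, if_pos hs]
        rw [hkeep, ih (acc ++ [s])]
        rw [List.filter_cons, if_pos hs, PySem.Set.ofList_cons]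
        have hfil : (rest.filter (fun y => !(acc ++ [s]).contains y && y != t)) =
            ((rest.filter (fun y => !acc.contains y && y != t)).filter (fun y => !(y == s))) := by
          rw [List.filter_filter]
          apply List.filter_congr
          intro y _
          simp only [List.contains_append, List.contains_cons, List.contains_nil]
          cases acc.contains y <;> cases h2 : (y == s) <;> cases h3 : (y == t) <;> simp [bne]
        have hdisc : PySem.Set.discard
            (PySem.Set.ofList (rest.filter (fun y => !acc.contains y && y != t))) s =
            PySem.Set.ofList (rest.filter (fun y => !(acc ++ [s]).contains y && y != t)) := by
          rw [hfil]
          exact (ofList_filter (fun y => !(y == s)) _).symm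
        rw [hdisc]
        have hn : (c + 1 - (acc.length : Int)).toNat =
            (c + 1 - ((acc ++ [s]).length : Int)).toNat + 1 := by
          simp only [List.length_append, List.length_cons, List.length_nil]
          omega
        rw [hn, List.take_succ_cons]
        simp [List.append_assoc]
      · have hskip : cutInner t c acc (s :: rest) = cutInner t c acc rest := by
          simp only [cutInner, if_neg hc]
          rw [if_neg (by simpa using hs)]
        rw [hskip, ih acc, List.filter_cons, if_neg (by simpa using hs)]

-- A's inner loop equals take of the target-filtered ordered dedup
theorem inner_final (t : String) (c : Int) (l : List String) :
    cutInner t c [] l =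
      ((PySem.Set.ofList l).filter (fun s => s != t)).take (max (c + 1) 0).toNat := by
  rw [cutInner_eq t c l []]
  have h1 : (fun s => !(List.contains [] s) && s != t) = (fun s : String => s != t) := by
    funext y; simp
  have h2 : (c + 1 - ((0 : Nat) : Int)).toNat = (max (c + 1) 0).toNat := by omega
  simp only [List.length_nil, h1, h2, List.nil_append]
  rw [ofList_filter]

-- the order-preserving dedup lists first occurrences: List.idxOf is monotone along it
theorem idxOf_pairwise (l : List String) :
    (PySem.Set.ofList l).Pairwise (fun a b => l.idxOf a ≤ l.idxOf b) := by
  induction l with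
  | nil => simp [PySem.Set.ofList_nil]
  | cons x l ih =>
    rw [PySem.Set.ofList_cons]
    constructor
    · intro b _
      simp [List.idxOf_cons_self]
    · have hsub : (PySem.Set.discard (PySem.Set.ofList l) x).Sublist (PySem.Set.ofList l) := by
        simp only [PySem.Set.discard]
        exact List.filter_sublist
      have hpw := ih.sublist hsub
      refine List.Pairwise.imp_of_mem ?_ hpw
      intro a b ha hb hab
      have hax : a ≠ x := ((PySem.Set.mem_discard _ _ _).1 ha).2
      have hbx : b ≠ x := ((PySem.Set.mem_discard _ _ _).1 hb).2
      rw [List.idxOf_cons_ne _ (by exact fun h => hax h.symm),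
          List.idxOf_cons_ne _ (by exact fun h => hbx h.symm)]
      omega

-- B's sort by first index is the identity on the discarded set
theorem sorted_discard (l : List String) (t : String) :
    PySem.List.sorted (PySem.Set.discard (PySem.Set.ofList l) t) (fun s => l.idxOf s) false =
      (PySem.Set.ofList l).filter (fun s => s != t) := by
  have hd : PySem.Set.discard (PySem.Set.ofList l) t =
      (PySem.Set.ofList l).filter (fun s => s != t) := by
    simp only [PySem.Set.discard]
    apply List.filter_congr
    intro y _
    cases h : (y == t) <;> simp [bne, h]
  rw [hd]
  apply PySem.List.sorted_eq_self_of_pairwise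
  exact (idxOf_pairwise l).sublist List.filter_sublist

-- the two per-entry fold steps agree, hence the folds agree
theorem fold_eq (c : Int) (m : List (String × List String)) :
    ∀ (d : PySem.Dict String (List String)),
    m.foldl (fun d p =>
        let synonyms_cutoff := cutInner p.1 c [] p.2
        if synonyms_cutoff.length ≠ 0 then d.insert p.1 synonyms_cutoff else d) d =
    m.foldl (fun d p =>
        let distinct := PySem.Set.discard (PySem.Set.ofList p.2) p.1
        let ordered := (PySem.List.sorted distinct (fun s => p.2.idxOf s) false).take
          (max (c + 1) 0).toNat
        if ordered ≠ [] then d.insert p.1 ordered else d) d := by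
  induction m with
  | nil => intro d; rfl
  | cons p rest ih =>
    intro d
    simp only [List.foldl_cons]
    rw [show (let synonyms_cutoff := cutInner p.1 c [] p.2;
        if synonyms_cutoff.length ≠ 0 then d.insert p.1 synonyms_cutoff else d) =
        (let distinct := PySem.Set.discard (PySem.Set.ofList p.2) p.1;
        let ordered := (PySem.List.sorted distinct (fun s => p.2.idxOf s) false).take
          (max (c + 1) 0).toNat;
        if ordered ≠ [] then d.insert p.1 ordered else d) by
      simp only [sorted_discard, inner_final p.1 c p.2, List.length_eq_zero_iff, ne_eq]]
    exact ih _

-- ===== VERDICT (by name: the statement is the Claim_ definition above) =====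
theorem cut_spec : Claim_equal_cut := by
  intro m c _
  show cut m c = cut_alt m c
  simp only [cut, cut_alt]
  rw [fold_eq c m PySem.Dict.empty]
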